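-- pv_equiv track=rewrite | github.com/HKU-BAL/ClairS | src/haplotype_filtering.py | get_base_list
-- ===== SOURCE A (Python) =====
-- from collections import Counter
--
-- def get_base_list(columns):
--     pileup_bases = columns[4]
--
--     base_idx = 0
--     base_list = []
--     read_end_set = set()
--     read_start_set = set()
--     while base_idx < len(pileup_bases):
--         base = pileup_bases[base_idx].upper()
--         if base == '+' or base == '-':
--             base_idx += 1
--             advance = 0
--             while True:
--                 num = pileup_bases[base_idx]
--                 if num.isdigit():
--                     advance = advance * 10 + int(num)
--                     base_idx += 1
--                 else:
--                     break
--             base_list[-1][1] = base + pileup_bases[base_idx: base_idx + advance].upper()  # add indel seq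
--             base_idx += advance - 1
--
--         elif base in "ACGTNacgtn#*":
--             base_list.append([base, ""])
--         elif base == '^':  # start of read, next base is mq, update mq info
--             base_idx += 1
--             read_start_set.add(len(base_list) - 1)
--         # skip $, the end of read
--         if base == "$":
--             read_end_set.add(len(base_list) - 1)
--         base_idx += 1
--     read_start_end_set = read_start_set if len(read_start_set) > len(read_end_set) else read_end_set
--     upper_base_counter = Counter([''.join(item).upper() for item in base_list])
--     return upper_base_counter, base_list, read_start_end_set
-- ===== SOURCE B (Python) =====
-- # Regex-scanner re-implementation: tokenize the pileup string with one compiled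
-- # alternation (read-start, indel header, base char, any single char) instead of
-- # the char-by-char index loop with a nested digit loop.
-- import re
-- from collections import Counter
--
-- _TOKEN = re.compile(r'(\^.?)|([+-])([0-9]*)|([ACGTNacgtn#*])|(.)', re.S)
--
-- def get_base_list(columns):
--     pileup_bases = columns[4]
--     base_list = []
--     read_start_set = set()
--     read_end_set = set()
--     pos = 0
--     n = len(pileup_bases)
--     while pos < n:
--         m = _TOKEN.match(pileup_bases, pos)
--         pos = m.end()
--         if m.group(1) is not None:
--             read_start_set.add(len(base_list) - 1)
--         elif m.group(2) is not None:
--             advance = int(m.group(3) or '0')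
--             base_list[-1][1] = m.group(2) + pileup_bases[pos:pos + advance].upper()
--             pos += advance
--         elif m.group(4) is not None:
--             base_list.append([m.group(4).upper(), ''])
--         elif m.group(5) == '$':
--             read_end_set.add(len(base_list) - 1)
--     read_start_end_set = read_start_set if len(read_start_set) > len(read_end_set) else read_end_set
--     upper_base_counter = Counter(''.join(item).upper() for item in base_list)
--     return upper_base_counter, base_list, read_start_end_set
-- ===== Notes on version B (the rewrite author's own statement) =====
-- stated objective: idiomatic
-- what changed: Replaces A's char-by-char index loop with a nested digit-accumulating inner loop and manual index arithmetic by a compiled regex tokenizer: one alternation yields whole tokens (read-start, indel header with its digit run, base char, single char) consumed by a single dispatch loop.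
import Mathlib
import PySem

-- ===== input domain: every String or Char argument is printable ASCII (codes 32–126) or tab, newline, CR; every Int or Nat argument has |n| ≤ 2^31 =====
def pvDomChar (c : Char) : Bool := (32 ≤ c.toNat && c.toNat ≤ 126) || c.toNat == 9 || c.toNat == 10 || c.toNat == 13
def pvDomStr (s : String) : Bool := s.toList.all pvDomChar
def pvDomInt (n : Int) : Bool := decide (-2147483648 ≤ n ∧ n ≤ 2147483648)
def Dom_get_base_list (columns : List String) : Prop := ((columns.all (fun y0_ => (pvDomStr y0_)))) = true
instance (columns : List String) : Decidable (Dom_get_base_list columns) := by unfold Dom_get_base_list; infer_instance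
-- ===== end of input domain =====

-- B replaces A's char-by-char index loop (with its nested digit-accumulating inner
-- loop) by a regex tokenizer: one compiled alternation produces whole tokens
-- (read-start, indel header with its digit run, base char, single char) which a
-- single dispatch loop consumes; same outputs on all inputs where A returns.

-- ===== PORT A =====
-- base_list items are the two-element lists [base, indel_suffix]
def pvBaseChars : List Char := ['A','C','G','T','N','a','c','g','t','n','#','*']

-- inner 'while True' digit loop: none = IndexError (digits run to end of string)
def pvA_digits : List Char → Nat → Option (Nat × List Char)
  | [], _ => none
  | c :: rest, acc =>
    if PySem.Chars.isdigit c then pvA_digits rest (acc * 10 + (c.toNat - 48))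
    else some (acc, c :: rest)

-- base_list[-1][1] = v
def pvSetLast : List (List String) → String → List (List String)
  | [], _ => []
  | [item], v => [PySem.List.pySetD item 1 v]
  | x :: y :: rest, v => x :: pvSetLast (y :: rest) v

def pvA_digits_length : ∀ (cs : List Char) (acc : Nat) (adv : Nat) (r : List Char),
    pvA_digits cs acc = some (adv, r) → r.length ≤ cs.length := by
  intro cs
  induction cs with
  | nil => intro _ _ _ h; simp [pvA_digits] at h
  | cons c rest ih =>
    intro acc adv r h
    simp only [pvA_digits] at h
    split at h
    · have := ih _ _ _ h; simpa using Nat.le_succ_of_le this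
    · injection h with h'; cases h'; simp

-- the 'while base_idx < len(pileup_bases)' loop; none = IndexError
def pvLoopA (cs : List Char) (bl : List (List String)) (ss es : PySem.Set Int) :
    Option (List (List String) × PySem.Set Int × PySem.Set Int) :=
  match cs with
  | [] => some (bl, ss, es)
  | c :: rest =>
    let base := PySem.Chars.upperChar c
    if base = '+' ∨ base = '-' then
      match h : pvA_digits rest 0 with
      | none => none
      | some (adv, rest') =>
        if bl.isEmpty then none  -- base_list[-1] raises on empty base_list
        else
          pvLoopA (rest'.drop adv)
            (pvSetLast bl (String.mk (base :: PySem.Chars.upper (rest'.take adv)))) ss es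
    else if base ∈ pvBaseChars then
      pvLoopA rest (bl ++ [[String.mk [base], ""]]) ss es
    else if base = '^' then
      pvLoopA (rest.drop 1) bl (PySem.Set.add ss ((bl.length : Int) - 1)) es
    else if base = '$' then
      pvLoopA rest bl ss (PySem.Set.add es ((bl.length : Int) - 1))
    else pvLoopA rest bl ss es
termination_by cs.length
decreasing_by
  all_goals simp_all
  · have h1 := pvA_digits_length rest 0 adv rest' h
    have h2 : (rest'.drop adv).length = rest'.length - adv := List.length_drop
    omega

def get_base_list (columns : List String) :
    (List (String × Int)) × List (List String) × List Int :=
  match PySem.List.pyGet? columns 4 with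
  | none => ([], [], [])  -- unreachable under Pre_ (IndexError)
  | some pileup_bases =>
    match pvLoopA pileup_bases.toList [] [] [] with
    | none => ([], [], [])  -- unreachable under Pre_ (IndexError)
    | some (bl, ss, es) =>
      let sel := if PySem.Set.len ss > PySem.Set.len es then ss else es
      ((PySem.Dict.counter
          (bl.map (fun item => PySem.Str.upper (PySem.Str.join "" item)))).items, bl, sel)

-- ===== PORT B =====
-- the regex alternation r'(\^.?)|([+-])([0-9]*)|([ACGTNacgtn#*])|(.)' matched at pos:
-- one token plus the remainder of the string after it
inductive PvTok where
  | readStart : PvTok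
  | indel : Char → Nat → PvTok
  | baseC : Char → PvTok
  | single : Char → PvTok
deriving DecidableEq

-- int(m.group(3) or '0') for a run of digit chars
def pvB_int (ds : List Char) : Nat := ds.foldl (fun a c => a * 10 + (c.toNat - 48)) 0

def pvB_match : List Char → PvTok × List Char
  | [] => (.single ' ', [])  -- never reached: the loop only matches at pos < n
  | c :: rest =>
    if c = '^' then (.readStart, rest.drop 1)
    else if c = '+' ∨ c = '-' then
      let p := rest.span PySem.Chars.isdigit
      (.indel c (pvB_int p.1), p.2)
    else if c ∈ pvBaseChars then (.baseC c, rest)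
    else (.single c, rest)

def pvB_match_length : ∀ (c : Char) (rest : List Char),
    (pvB_match (c :: rest)).2.length ≤ rest.length := by
  intro c rest
  simp only [pvB_match]
  split_ifs with h1 h2 h3 <;> simp
  · exact List.length_dropWhile_le _ _

-- the 'while pos < n' dispatch loop over tokens; none = IndexError (base_list[-1])
def pvLoopB (cs : List Char) (bl : List (List String)) (ss es : PySem.Set Int) :
    Option (List (List String) × PySem.Set Int × PySem.Set Int) :=
  match cs with
  | [] => some (bl, ss, es)
  | c :: rest =>
    match h : pvB_match (c :: rest) with
    | (.readStart, rest') => pvLoopB rest' bl (PySem.Set.add ss ((bl.length : Int) - 1)) es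
    | (.indel sign adv, rest') =>
      if bl.isEmpty then none
      else
        pvLoopB (rest'.drop adv)
          (pvSetLast bl (String.mk (sign :: PySem.Chars.upper (rest'.take adv)))) ss es
    | (.baseC b, rest') =>
      pvLoopB rest' (bl ++ [[String.mk [PySem.Chars.upperChar b], ""]]) ss es
    | (.single ch, rest') =>
      if ch = '$' then pvLoopB rest' bl ss (PySem.Set.add es ((bl.length : Int) - 1))
      else pvLoopB rest' bl ss es
termination_by cs.length
decreasing_by
  all_goals
    have hle := pvB_match_length c rest
    rw [h] at hle
    simp at hle ⊢
  all_goals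
    first
    | omega
    | (have h2 : (rest'.drop adv).length = rest'.length - adv := List.length_drop; omega)

def get_base_list_alt (columns : List String) :
    (List (String × Int)) × List (List String) × List Int :=
  match PySem.List.pyGet? columns 4 with
  | none => ([], [], [])  -- unreachable under Pre_ (IndexError)
  | some pileup_bases =>
    match pvLoopB pileup_bases.toList [] [] [] with
    | none => ([], [], [])  -- unreachable under Pre_ (IndexError)
    | some (bl, ss, es) =>
      let sel := if PySem.Set.len ss > PySem.Set.len es then ss else es
      ((PySem.Dict.counter
          (bl.map (fun item => PySem.Str.upper (PySem.Str.join "" item)))).items, bl, sel)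

-- ===== PRECONDITION & SPEC =====
-- Pre_ excludes exactly the inputs on which A raises IndexError: fewer than five
-- columns, an indel token occurring while base_list is still empty, or an indel
-- header whose digit run reaches the end of the pileup string.  pvOk is a grammar
-- recognizer over the string (hb = "some base has been seen"); it builds nothing.
def pvOkGo : Nat → List Char → Bool → Bool
  | _, [], _ => true
  | 0, _ :: _, _ => true   -- never reached: the fuel is the list's length
  | fuel + 1, c :: rest, hb =>
    let base := PySem.Chars.upperChar c
    if base = '+' ∨ base = '-' then
      let p := rest.span PySem.Chars.isdigit
      if p.2.isEmpty then false
      else hb && pvOkGo fuel (p.2.drop (p.1.foldl (fun a c => a * 10 + (c.toNat - 48)) 0)) hb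
    else if base ∈ pvBaseChars then pvOkGo fuel rest true
    else if base = '^' then pvOkGo fuel (rest.drop 1) hb
    else pvOkGo fuel rest hb

def pvOk (cs : List Char) (hb : Bool) : Bool := pvOkGo cs.length cs hb

def Pre_get_base_list (columns : List String) : Prop :=
  4 < columns.length ∧ pvOk (columns.getD 4 "").toList false = true
instance (columns : List String) : Decidable (Pre_get_base_list columns) := by
  unfold Pre_get_base_list; infer_instance

def pvWitness_get_base_list : List String :=
  ["chr1", "100", "N", "6", "^IA+2ggT$t-1c*"]

def Spec_get_base_list (columns : List String) (out : (List (String × Int)) × List (List String) × List Int) : Prop := out = get_base_list_alt columns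
instance (columns : List String) (out : (List (String × Int)) × List (List String) × List Int) : Decidable (Spec_get_base_list columns out) := by unfold Spec_get_base_list; infer_instance

-- ===== CLAIM (what is proved, stated in full; the proofs are below) =====
def Claim_equal_get_base_list : Prop := ∀ (columns : List String), Dom_get_base_list columns → Pre_get_base_list columns → Spec_get_base_list columns (get_base_list columns)

-- ===== LEMMAS AND PROOFS =====

-- pvOkGo ignores its fuel as long as the fuel covers the list
theorem pvOkGo_congr : ∀ (n : Nat) (cs : List Char), cs.length ≤ n → ∀ (hb : Bool) (f1 f2 : Nat),
    cs.length ≤ f1 → cs.length ≤ f2 → pvOkGo f1 cs hb = pvOkGo f2 cs hb := by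
  intro n
  induction n with
  | zero =>
    intro cs h1 hb f1 f2 _ _
    have : cs = [] := List.eq_nil_of_length_eq_zero (Nat.le_zero.mp h1)
    subst this
    cases f1 <;> cases f2 <;> simp [pvOkGo]
  | succ n ih =>
    intro cs hlen hb f1 f2 h1 h2
    match cs, f1, f2 with
    | [], _, _ => cases f1 <;> cases f2 <;> simp [pvOkGo]
    | c :: rest, 0, _ => simp at h1
    | c :: rest, _ + 1, 0 => simp at h2
    | c :: rest, a + 1, b + 1 =>
      simp only [pvOkGo]
      have hra : rest.length ≤ a := by simpa using h1
      have hrb : rest.length ≤ b := by simpa using h2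
      have hrn : rest.length ≤ n := by simpa using hlen
      by_cases hc : PySem.Chars.upperChar c = '+' ∨ PySem.Chars.upperChar c = '-'
      · rw [if_pos hc, if_pos hc]
        by_cases he : (rest.span PySem.Chars.isdigit).2.isEmpty
        · rw [if_pos he, if_pos he]
        · rw [if_neg he, if_neg he]
          have hsp : (rest.span PySem.Chars.isdigit).2.length ≤ rest.length := by
            simp only [List.span_eq_takeWhile_dropWhile]
            exact List.length_dropWhile_le _ _
          have hdl := List.length_drop (l := (rest.span PySem.Chars.isdigit).2)
            (i := (rest.span PySem.Chars.isdigit).1.foldl (fun a c => a * 10 + (c.toNat - 48)) 0)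
          congr 1
          exact ih _ (by omega) hb a b (by omega) (by omega)
      · rw [if_neg hc, if_neg hc]
        by_cases hm : PySem.Chars.upperChar c ∈ pvBaseChars
        · rw [if_pos hm, if_pos hm]
          exact ih rest hrn true a b hra hrb
        · rw [if_neg hm, if_neg hm]
          by_cases hk : PySem.Chars.upperChar c = '^'
          · have hdl := List.length_drop (l := rest) (i := 1)
            rw [if_pos hk, if_pos hk]
            exact ih _ (by omega) hb a b (by omega) (by omega)
          · rw [if_neg hk, if_neg hk]
            exact ih rest hrn hb a b hra hrb

-- one unfolding step of the recognizer
theorem pvOk_cons (c : Char) (rest : List Char) (hb : Bool) : pvOk (c :: rest) hb =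
    (if PySem.Chars.upperChar c = '+' ∨ PySem.Chars.upperChar c = '-' then
      if (rest.span PySem.Chars.isdigit).2.isEmpty then false
      else hb && pvOk ((rest.span PySem.Chars.isdigit).2.drop
        ((rest.span PySem.Chars.isdigit).1.foldl (fun a c => a * 10 + (c.toNat - 48)) 0)) hb
    else if PySem.Chars.upperChar c ∈ pvBaseChars then pvOk rest true
    else if PySem.Chars.upperChar c = '^' then pvOk (rest.drop 1) hb
    else pvOk rest hb) := by
  show pvOkGo (c :: rest).length (c :: rest) hb = _
  rw [List.length_cons]
  simp only [pvOkGo]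
  unfold pvOk
  by_cases hc : PySem.Chars.upperChar c = '+' ∨ PySem.Chars.upperChar c = '-'
  · rw [if_pos hc, if_pos hc]
    by_cases he : (rest.span PySem.Chars.isdigit).2.isEmpty
    · rw [if_pos he, if_pos he]
    · rw [if_neg he, if_neg he]
      have hsp : (rest.span PySem.Chars.isdigit).2.length ≤ rest.length := by
        simp only [List.span_eq_takeWhile_dropWhile]
        exact List.length_dropWhile_le _ _
      have hdl := List.length_drop (l := (rest.span PySem.Chars.isdigit).2)
        (i := (rest.span PySem.Chars.isdigit).1.foldl (fun a c => a * 10 + (c.toNat - 48)) 0)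
      congr 1
      exact pvOkGo_congr rest.length _ (by omega) hb _ _ (by omega) (by omega)
  · rw [if_neg hc, if_neg hc]
    by_cases hm : PySem.Chars.upperChar c ∈ pvBaseChars
    · rw [if_pos hm, if_pos hm]
    · rw [if_neg hm, if_neg hm]
      by_cases hk : PySem.Chars.upperChar c = '^'
      · have hdl := List.length_drop (l := rest) (i := 1)
        rw [if_pos hk, if_pos hk]
        exact pvOkGo_congr rest.length _ (by omega) hb _ _ (by omega) (by omega)
      · rw [if_neg hk, if_neg hk]

theorem pv_chr_eq (c b : Char) : (c = b) ↔ c.toNat = b.toNat := by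
  constructor
  · intro h; rw [h]
  · intro h
    have := congrArg Char.ofNat h
    rwa [Char.ofNat_toNat, Char.ofNat_toNat] at this

theorem pv_chr_le (c d : Char) : (c ≤ d) ↔ c.toNat ≤ d.toNat := by
  rw [Char.le_def, UInt32.le_iff_toNat_le]; rfl

theorem pv_upperChar_toNat (c : Char) :
    (PySem.Chars.upperChar c).toNat =
      if 97 ≤ c.toNat ∧ c.toNat ≤ 122 then c.toNat - 32 else c.toNat := by
  simp only [PySem.Chars.upperChar, PySem.Chars.islower]
  have ha : ('a' : Char).toNat = 97 := rfl
  have hz : ('z' : Char).toNat = 122 := rfl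
  by_cases h : 97 ≤ c.toNat ∧ c.toNat ≤ 122
  · have h1 : 'a' ≤ c := (pv_chr_le 'a' c).mpr (by rw [ha]; omega)
    have h2 : c ≤ 'z' := (pv_chr_le c 'z').mpr (by rw [hz]; omega)
    simp only [h1, h2, decide_true, Bool.and_self, if_pos, h]
    rw [Char.toNat_ofNat]
    have hv : Nat.isValidChar (c.toNat - 32) := Or.inl (by omega)
    simp [hv]
  · have : ¬('a' ≤ c ∧ c ≤ 'z') := by
      intro ⟨h1, h2⟩
      exact h ⟨(pv_chr_le 'a' c).mp h1, (pv_chr_le c 'z').mp h2⟩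
    rcases not_and_or.mp this with h1 | h2
    · simp [h1, h]
    · simp [h2, h]

-- upperChar only moves 'a'..'z' into 'A'..'Z': for a target that is no letter,
-- 'upperChar c = b' is just 'c = b'
theorem pv_upper_eq_symbol (c b : Char) (hb : ¬ (65 ≤ b.toNat ∧ b.toNat ≤ 90))
    (hb' : ¬ (97 ≤ b.toNat ∧ b.toNat ≤ 122)) :
    (PySem.Chars.upperChar c = b) ↔ c = b := by
  rw [pv_chr_eq, pv_chr_eq, pv_upperChar_toNat]
  split_ifs with h <;> omega

theorem pv_mem_bases_toNat (x : Char) :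
    (x ∈ pvBaseChars) ↔ x.toNat ∈ ([65, 67, 71, 84, 78, 97, 99, 103, 116, 110, 35, 42] : List Nat) := by
  constructor
  · intro h; fin_cases h <;> decide
  · intro h
    simp only [List.mem_cons, List.not_mem_nil, or_false] at h
    simp only [pvBaseChars, List.mem_cons, List.not_mem_nil, or_false]
    rcases h with h | h | h | h | h | h | h | h | h | h | h | h <;>
      [skip; skip; skip; skip; skip; skip; skip; skip; skip; skip; skip; skip] <;>
      first
        | (left; exact (pv_chr_eq _ _).mpr h)
        | (right; left; exact (pv_chr_eq _ _).mpr h)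
        | (right; right; left; exact (pv_chr_eq _ _).mpr h)
        | (right; right; right; left; exact (pv_chr_eq _ _).mpr h)
        | (right; right; right; right; left; exact (pv_chr_eq _ _).mpr h)
        | (right; right; right; right; right; left; exact (pv_chr_eq _ _).mpr h)
        | (right; right; right; right; right; right; left; exact (pv_chr_eq _ _).mpr h)
        | (right; right; right; right; right; right; right; left; exact (pv_chr_eq _ _).mpr h)
        | (right; right; right; right; right; right; right; right; left; exact (pv_chr_eq _ _).mpr h)
        | (right; right; right; right; right; right; right; right; right; left; exact (pv_chr_eq _ _).mpr h)
        | (right; right; right; right; right; right; right; right; right; right; left; exact (pv_chr_eq _ _).mpr h)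
        | (right; right; right; right; right; right; right; right; right; right; right; exact (pv_chr_eq _ _).mpr h)

theorem pv_upper_mem_bases (c : Char) :
    (PySem.Chars.upperChar c ∈ pvBaseChars) ↔ c ∈ pvBaseChars := by
  rw [pv_mem_bases_toNat, pv_mem_bases_toNat, pv_upperChar_toNat]
  simp only [List.mem_cons, List.not_mem_nil, or_false]
  split_ifs with h <;> omega

-- A's inner digit loop is span-then-fold
theorem pvA_digits_eq_span (cs : List Char) (acc : Nat) :
    pvA_digits cs acc =
      if (cs.dropWhile PySem.Chars.isdigit).isEmpty then none
      else some ((cs.takeWhile PySem.Chars.isdigit).foldl (fun a c => a * 10 + (c.toNat - 48)) acc,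
                 cs.dropWhile PySem.Chars.isdigit) := by
  induction cs generalizing acc with
  | nil => simp [pvA_digits]
  | cons c rest ih =>
    by_cases hd : PySem.Chars.isdigit c
    · simp [pvA_digits, hd, ih]
    · simp [pvA_digits, hd]

theorem pvSetLast_isEmpty (bl : List (List String)) (v : String) :
    (pvSetLast bl v).isEmpty = bl.isEmpty := by
  match bl with
  | [] => rfl
  | [x] => rfl
  | x :: y :: r => rfl

-- the two scanning loops agree wherever the recognizer accepts
theorem pvLoop_eq (n : Nat) : ∀ (cs : List Char), cs.length ≤ n →
    ∀ (bl : List (List String)) (ss es : PySem.Set Int),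
    pvOk cs (!bl.isEmpty) = true → pvLoopA cs bl ss es = pvLoopB cs bl ss es := by
  induction n with
  | zero =>
    intro cs hlen bl ss es _
    have : cs = [] := List.eq_nil_of_length_eq_zero (Nat.le_zero.mp hlen)
    subst this; rw [pvLoopA, pvLoopB]
  | succ n ih =>
    intro cs hlen bl ss es hok
    match cs with
    | [] => rw [pvLoopA, pvLoopB]
    | c :: rest =>
      rw [pvLoopA, pvLoopB, pvB_match]
      rw [pvOk_cons] at hok
      simp only [List.span_eq_takeWhile_dropWhile] at hok ⊢
      have hlen' : rest.length ≤ n := by simpa using hlen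
      by_cases hpm : c = '+' ∨ c = '-'
      · -- indel token
        have hup : PySem.Chars.upperChar c = c := by
          rcases hpm with h | h <;> subst h <;> decide
        have hcond : (PySem.Chars.upperChar c = '+' ∨ PySem.Chars.upperChar c = '-') := by
          rw [hup]; exact hpm
        have hne : ¬ c = '^' := by rcases hpm with h | h <;> subst h <;> decide
        simp only [hup, if_pos hpm, if_neg hne] at hok ⊢
        by_cases hdw : (List.dropWhile PySem.Chars.isdigit rest).isEmpty = true
        · rw [if_pos hdw] at hok; simp at hok
        · rw [if_neg hdw] at hok
          simp only [Bool.and_eq_true] at hok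
          obtain ⟨hbl, hcont⟩ := hok
          have hblf : bl.isEmpty = false := by simpa using hbl
          have hspan : pvA_digits rest 0 = some
              ((List.takeWhile PySem.Chars.isdigit rest).foldl (fun a c => a * 10 + (c.toNat - 48)) 0,
               List.dropWhile PySem.Chars.isdigit rest) := by
            rw [pvA_digits_eq_span, if_neg hdw]
          rw [hspan, if_pos hpm]
          simp only [hblf, Bool.false_eq_true, if_false, pvB_int]
          rw [if_neg hne]
          simp only [List.span_eq_takeWhile_dropWhile]
          apply ih
          · have h1 : (List.dropWhile PySem.Chars.isdigit rest).length ≤ rest.length :=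
              List.length_dropWhile_le _ _
            have h2 : ((List.dropWhile PySem.Chars.isdigit rest).drop
                ((List.takeWhile PySem.Chars.isdigit rest).foldl (fun a c => a * 10 + (c.toNat - 48)) 0)).length
                = (List.dropWhile PySem.Chars.isdigit rest).length
                  - (List.takeWhile PySem.Chars.isdigit rest).foldl (fun a c => a * 10 + (c.toNat - 48)) 0 :=
              List.length_drop
            omega
          · rw [pvSetLast_isEmpty, hblf]
            rw [hblf] at hcont
            exact hcont
      · -- not an indel header
        have e1 : (PySem.Chars.upperChar c = '+') ↔ c = '+' :=
          pv_upper_eq_symbol c '+' (by decide) (by decide)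
        have e2 : (PySem.Chars.upperChar c = '-') ↔ c = '-' :=
          pv_upper_eq_symbol c '-' (by decide) (by decide)
        have e3 : (PySem.Chars.upperChar c = '^') ↔ c = '^' :=
          pv_upper_eq_symbol c '^' (by decide) (by decide)
        have e4 : (PySem.Chars.upperChar c = '$') ↔ c = '$' :=
          pv_upper_eq_symbol c '$' (by decide) (by decide)
        have hAc : ¬ (PySem.Chars.upperChar c = '+' ∨ PySem.Chars.upperChar c = '-') := by
          rw [e1, e2]; exact hpm
        rw [if_neg hAc]
        rw [if_neg hAc] at hok
        by_cases hcar : c = '^'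
        · subst hcar
          rw [if_neg (by decide : ¬ PySem.Chars.upperChar '^' ∈ pvBaseChars),
            if_pos (by decide : PySem.Chars.upperChar '^' = '^')]
          rw [if_neg (by decide : ¬ PySem.Chars.upperChar '^' ∈ pvBaseChars),
            if_pos (by decide : PySem.Chars.upperChar '^' = '^')] at hok
          rw [if_pos rfl]
          exact ih (rest.drop 1)
            (by have : (rest.drop 1).length = rest.length - 1 := List.length_drop; omega)
            bl _ es hok
        · by_cases hmem : c ∈ pvBaseChars
          · have hmemU : PySem.Chars.upperChar c ∈ pvBaseChars := (pv_upper_mem_bases c).mpr hmem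
            rw [if_pos hmemU]
            rw [if_pos hmemU] at hok
            rw [if_neg hcar, if_neg hpm, if_pos hmem]
            refine ih rest hlen' (bl ++ [[String.mk [PySem.Chars.upperChar c], ""]]) ss es ?_
            have : (bl ++ [[String.mk [PySem.Chars.upperChar c], ""]]).isEmpty = false := by
              simp
            rw [this]
            exact hok
          · have hmemU : ¬ PySem.Chars.upperChar c ∈ pvBaseChars :=
              fun h => hmem ((pv_upper_mem_bases c).mp h)
            have hAcar : ¬ PySem.Chars.upperChar c = '^' := by rw [e3]; exact hcar
            rw [if_neg hmemU, if_neg hAcar]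
            rw [if_neg hmemU, if_neg hAcar] at hok
            rw [if_neg hcar, if_neg hpm, if_neg hmem]
            change _ = if c = '$' then pvLoopB rest bl ss (PySem.Set.add es ((bl.length : Int) - 1))
              else pvLoopB rest bl ss es
            by_cases hdol : c = '$'
            · rw [if_pos (e4.mpr hdol), if_pos hdol]
              exact ih rest hlen' bl ss _ hok
            · rw [if_neg (fun h => hdol (e4.mp h)), if_neg hdol]
              exact ih rest hlen' bl ss es hok


-- ===== VERDICT (by name: the statement is the Claim_ definition above) =====
theorem get_base_list_spec : Claim_equal_get_base_list := by
  intro columns _ hpre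
  unfold Spec_get_base_list get_base_list get_base_list_alt
  obtain ⟨hlen, hok⟩ := hpre
  have h4 : PySem.List.pyGet? columns 4 = some (columns.getD 4 "") := by
    rw [show (4 : Int) = ((4 : Nat) : Int) by norm_num, PySem.List.pyGet?_natCast]
    rw [List.getD_eq_getElem?_getD, List.getElem?_eq_getElem hlen]
    rfl
  rw [h4]
  simp only [Option.some.injEq]
  rw [pvLoop_eq (columns.getD 4 "").toList.length (columns.getD 4 "").toList le_rfl [] [] []
    hok]
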